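-- pv_equiv track=rewrite | github.com/Molodchina/MSU-ML-Prac | numpy-pandas-matplotlib/functions.py | sum_non_neg_diag
-- ===== SOURCE A (Python) =====
-- from typing import List
--
-- def sum_non_neg_diag(X: List[List[int]]) -> int:
--     """
--     Вернуть  сумму неотрицательных элементов на диагонали прямоугольной матрицы X.
--     Если неотрицательных элементов на диагонали нет, то вернуть -1
--     """
--     i, j = 0, 0
--     diag = []
--     while i < min(len(X), len(X[0])):
--         diag.append(X[i][i])
--         i += 1
--     return -1 if all(x < 0 for x in diag) \
--         else sum((x > 0) * x for x in diag)
-- ===== SOURCE B (Python) =====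
-- def sum_non_neg_diag(X):
--     n = min(len(X), len(X[0]))
--     seen = False
--     total = 0
--     for i in range(n):
--         v = X[i][i]
--         if v >= 0:
--             seen = True
--             if v > 0:
--                 total += v
--     return total if seen else -1
-- ===== Notes on version B (the rewrite author's own statement) =====
-- stated objective: simpler
-- what changed: Replaces the list-building while loop followed by two separate generator passes (all(...) and sum(...)) with a single for-loop over the diagonal that maintains a seen-non-negative flag and a running total.
import Mathlib
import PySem

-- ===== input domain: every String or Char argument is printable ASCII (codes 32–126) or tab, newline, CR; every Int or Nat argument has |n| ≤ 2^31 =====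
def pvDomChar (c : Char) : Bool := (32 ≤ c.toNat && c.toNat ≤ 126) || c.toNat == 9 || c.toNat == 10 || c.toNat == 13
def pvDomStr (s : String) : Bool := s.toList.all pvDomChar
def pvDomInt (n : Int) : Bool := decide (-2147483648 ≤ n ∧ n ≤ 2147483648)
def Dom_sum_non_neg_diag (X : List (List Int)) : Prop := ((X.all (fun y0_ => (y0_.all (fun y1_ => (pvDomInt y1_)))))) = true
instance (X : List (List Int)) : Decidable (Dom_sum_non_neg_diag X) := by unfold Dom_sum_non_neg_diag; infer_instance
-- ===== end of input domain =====

-- B replaces A's list-building loop plus two generator passes by one flag+accumulator pass (objective: simpler).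

-- ===== PORT A =====
-- the while loop building `diag` (appends X[i][i], i += 1 until i < min(len X, len X[0]) fails)
def pvDiagLoopA (X : List (List Int)) (n i : Nat) (acc : List Int) : List Int :=
  if i < n then
    pvDiagLoopA X n (i + 1) (acc ++ [(PySem.List.pyGet? ((PySem.List.pyGet? X (i : Int)).getD []) (i : Int)).getD 0])
  else acc
termination_by n - i

def sum_non_neg_diag (X : List (List Int)) : Int :=
  let n := min X.length ((PySem.List.pyGet? X 0).getD []).length
  let diag := pvDiagLoopA X n 0 []
  if diag.all (fun x => x < 0) then -1
  else (diag.map (fun x => (if x > 0 then (1:Int) else 0) * x)).sum   -- (x > 0) * x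

-- ===== PORT B =====
def sum_non_neg_diag_alt (X : List (List Int)) : Int :=
  let n := min X.length ((PySem.List.pyGet? X 0).getD []).length
  let st := (List.range n).foldl (fun (st : Bool × Int) (i : Nat) =>
    let v := (PySem.List.pyGet? ((PySem.List.pyGet? X (i : Int)).getD []) (i : Int)).getD 0
    if v ≥ 0 then (true, if v > 0 then st.2 + v else st.2) else st) (false, 0)
  if st.1 then st.2 else -1

-- ===== PRECONDITION & SPEC =====
-- Pre_ excludes exactly the inputs where Python A raises IndexError: empty X (X[0]),
-- and ragged X whose i-th row is too short for X[i][i] with i below the loop bound.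
def Pre_sum_non_neg_diag (X : List (List Int)) : Prop :=
  X ≠ [] ∧ ∀ i, i < min X.length (X.headD []).length → i < (X.getD i []).length
instance (X : List (List Int)) : Decidable (Pre_sum_non_neg_diag X) := by
  unfold Pre_sum_non_neg_diag; infer_instance
def pvWitness_sum_non_neg_diag : List (List Int) := [[1, -2], [3, 4]]

def Spec_sum_non_neg_diag (X : List (List Int)) (out : Int) : Prop := out = sum_non_neg_diag_alt X
instance (X : List (List Int)) (out : Int) : Decidable (Spec_sum_non_neg_diag X out) := by unfold Spec_sum_non_neg_diag; infer_instance

-- ===== CLAIM (what is proved, stated in full; the proofs are below) =====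
def Claim_equal_sum_non_neg_diag : Prop := ∀ (X : List (List Int)), Dom_sum_non_neg_diag X → Pre_sum_non_neg_diag X → Spec_sum_non_neg_diag X (sum_non_neg_diag X)

-- ===== LEMMAS AND PROOFS =====

theorem pvDiagLoopA_eq (X : List (List Int)) (n : Nat) :
    ∀ (k i : Nat) (acc : List Int), n = i + k →
      pvDiagLoopA X n i acc = acc ++ (List.range' i k).map
        (fun (j : Nat) => (PySem.List.pyGet? ((PySem.List.pyGet? X (j : Int)).getD []) (j : Int)).getD 0) := by
  intro k
  induction k with
  | zero => intro i acc h; unfold pvDiagLoopA; simp [h]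
  | succ k ih =>
      intro i acc h
      unfold pvDiagLoopA
      have hi : i < n := by omega
      rw [if_pos hi, ih (i + 1) _ (by omega), List.range'_succ]
      simp

theorem foldB_eq (f : Nat → Int) :
    ∀ (l : List Nat) (b : Bool) (t : Int),
      l.foldl (fun (st : Bool × Int) (i : Nat) =>
        let v := f i
        if v ≥ 0 then (true, if v > 0 then st.2 + v else st.2) else st) (b, t)
      = (b || l.any (fun i => 0 ≤ f i),
         t + (l.map (fun i => (if f i > 0 then (1:Int) else 0) * f i)).sum) := by
  intro l
  induction l with
  | nil => intro b t; simp
  | cons x xs ih =>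
      intro b t
      simp only [List.foldl_cons, List.any_cons, List.map_cons, List.sum_cons]
      by_cases hv : f x ≥ 0
      · simp only [if_pos hv, ih]
        by_cases hp : f x > 0
        · simp [hp, hv, add_assoc]
        · have h0 : f x = 0 := by omega
          simp [hp, h0]
      · simp only [if_neg hv, ih]
        have h1 : decide (0 ≤ f x) = false := by simpa using hv
        have h2 : ¬ f x > 0 := by omega
        simp [h1, h2]

theorem all_neg_eq (f : Nat → Int) (l : List Nat) :
    ((l.map f).all fun x => x < 0) = !(l.any fun i => 0 ≤ f i) := by
  induction l with
  | nil => simp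
  | cons x xs ih =>
      simp only [List.map_cons, List.all_cons, List.any_cons, ih, Bool.not_or]
      congr 1
      by_cases h : 0 ≤ f x <;> simp [h] <;> omega

-- ===== VERDICT (by name: the statement is the Claim_ definition above) =====
theorem sum_non_neg_diag_spec : Claim_equal_sum_non_neg_diag := by
  intro X _ _
  unfold Spec_sum_non_neg_diag sum_non_neg_diag sum_non_neg_diag_alt
  simp only []
  set n := min X.length ((PySem.List.pyGet? X 0).getD []).length with hn
  rw [pvDiagLoopA_eq X n n 0 [] (by omega), foldB_eq, List.range_eq_range', List.nil_append,
    all_neg_eq, List.map_map]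
  cases h : (List.range' 0 n).any
      (fun (j : Nat) => 0 ≤ (PySem.List.pyGet? ((PySem.List.pyGet? X (j : Int)).getD []) (j : Int)).getD 0) <;>
    simp [h, Function.comp_def]
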